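-- pv_equiv track=rewrite | github.com/fhta0/doc-helper | backend/app/services/rule_engine.py | _merge_consecutive_figures
-- ===== SOURCE A (Python) =====
-- from typing import Dict, List, Any, Optional
--
-- def _merge_consecutive_figures(figure_locs: List[Dict[str, Any]]) -> List[str]:
--     """
--     Merge consecutive figure/table locations by index.
--
--     Args:
--         figure_locs: List of figure location dictionaries sorted by index
--
--     Returns:
--         List of merged location strings
--     """
--     if not figure_locs:
--         return []
--
--     # Sort and deduplicate by index
--     sorted_locs = sorted(figure_locs, key=lambda x: x.get("index", 0))
--     seen_indices = set()
--     unique_locs = []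
--     for loc in sorted_locs:
--         idx = loc.get("index", 0)
--         if idx not in seen_indices:
--             seen_indices.add(idx)
--             unique_locs.append(loc)
--
--     merged = []
--     i = 0
--
--     while i < len(unique_locs):
--         start_idx = unique_locs[i].get("index", 0)
--         j = i + 1
--
--         # Find consecutive indices
--         while j < len(unique_locs):
--             next_idx = unique_locs[j].get("index", 0)
--             if next_idx == start_idx + (j - i):
--                 j += 1
--             else:
--                 break
--
--         # Generate merged string
--         if j - i >= 3:
--             # Merge 3 or more consecutive
--             end_idx = unique_locs[j - 1].get("index", 0)
--             merged.append(f"第{start_idx + 1}~{end_idx + 1}个图表")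
--         else:
--             # Show individually
--             for k in range(i, j):
--                 idx = unique_locs[k].get("index", 0)
--                 merged.append(f"第{idx + 1}个图表")
--
--         i = j
--
--     return merged
-- ===== SOURCE B (Python) =====
-- def _merge_consecutive_figures(figure_locs):
--     if not figure_locs:
--         return []
--     present = {loc.get("index", 0) for loc in figure_locs}
--     merged = []
--     # run starts = members whose predecessor is absent; extend each by membership
--     for start in sorted(idx for idx in present if idx - 1 not in present):
--         end = start
--         while end + 1 in present:
--             end += 1
--         if end - start >= 2:
--             merged.append(f"第{start + 1}~{end + 1}个图表")
--         else:
--             for idx in range(start, end + 1):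
--                 merged.append(f"第{idx + 1}个图表")
--     return merged
-- ===== Notes on version B (the rewrite author's own statement) =====
-- stated objective: alternative
-- what changed: A sorts the dict list, dedups with a seen-set, then walks positions with a nested two-pointer scan comparing adjacent sorted entries; B never scans adjacent sorted elements: it detects run starts purely by hash-set membership (idx present, idx-1 absent), sorts only the starts, and grows each run by probing end+1 in the set.
import Mathlib
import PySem

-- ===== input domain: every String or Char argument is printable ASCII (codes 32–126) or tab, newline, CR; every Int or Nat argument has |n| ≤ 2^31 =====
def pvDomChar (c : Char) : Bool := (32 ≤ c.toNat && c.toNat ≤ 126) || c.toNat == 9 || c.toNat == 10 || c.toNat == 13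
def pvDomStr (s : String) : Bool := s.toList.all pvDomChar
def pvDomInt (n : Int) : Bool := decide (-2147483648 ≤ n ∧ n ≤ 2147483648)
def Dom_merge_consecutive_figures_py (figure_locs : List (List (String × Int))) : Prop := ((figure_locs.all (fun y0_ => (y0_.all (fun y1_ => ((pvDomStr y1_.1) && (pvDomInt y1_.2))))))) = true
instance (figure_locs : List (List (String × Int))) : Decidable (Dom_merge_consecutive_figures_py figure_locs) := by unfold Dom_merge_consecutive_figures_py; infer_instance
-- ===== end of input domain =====

-- B replaces A's sort/dedup-then-adjacent-scan by hash-set run detection: collect the set of indices,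
-- take as run starts the members whose predecessor is absent, sort only those, and grow each run by
-- probing end+1 in the set. Objective: alternative algorithm, same asymptotic cost.

-- loc.get("index", 0) — shared field accessor of both Pythons
def pvIdx (loc : List (String × Int)) : Int := (PySem.Dict.mk loc).getD "index" 0

-- ===== PORT A =====
-- inner while loop: advance j while unique_locs[j].get("index",0) == start_idx + (j - i)
def aInner (ul : List (List (String × Int))) (start_idx : Int) (i j : Nat) : Nat :=
  if h : j < ul.length then
    if pvIdx ul[j] = start_idx + ((j : Int) - (i : Int)) then aInner ul start_idx i (j + 1) else j
  else j
termination_by ul.length - j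

-- needed by aOuter's termination
theorem le_aInner (ul : List (List (String × Int))) (s : Int) (i : Nat) :
    ∀ j, j ≤ aInner ul s i j := by
  intro j
  induction hn : ul.length - j using Nat.strong_induction_on generalizing j with
  | _ n ih =>
    rw [aInner]
    split
    · split
      · have h2 := ih (ul.length - (j + 1)) (by omega) (j + 1) rfl
        omega
      · exact le_refl j
    · exact le_refl j

-- outer while loop of A
def aOuter (ul : List (List (String × Int))) (i : Nat) (merged : List String) : List String :=
  if h : i < ul.length then
    let start_idx := pvIdx ul[i]
    let j := aInner ul start_idx i (i + 1)
    let merged' :=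
      if j - i ≥ 3 then
        merged ++ ["第" ++ PySem.Int.toStr (start_idx + 1) ++ "~" ++
          PySem.Int.toStr (pvIdx (PySem.List.pyGetD ul ((j : Int) - 1) []) + 1) ++ "个图表"]
      else
        merged ++ (PySem.List.pyRange (i : Int) (j : Int) 1).map
          (fun k => "第" ++ PySem.Int.toStr (pvIdx (PySem.List.pyGetD ul k []) + 1) ++ "个图表")
    aOuter ul j merged'
  else merged
termination_by ul.length - i
decreasing_by
  have := le_aInner ul (pvIdx (ul[i]'h)) i (i + 1)
  omega

-- the sort-then-dedup prefix of A
def aDedup (sorted_locs : List (List (String × Int))) : List (List (String × Int)) :=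
  (sorted_locs.foldl
    (fun (st : PySem.Set Int × List (List (String × Int))) loc =>
      let idx := pvIdx loc
      if PySem.Set.contains st.1 idx then st else (PySem.Set.add st.1 idx, st.2 ++ [loc]))
    (PySem.Set.empty, [])).2

def merge_consecutive_figures_py (figure_locs : List (List (String × Int))) : List String :=
  if figure_locs = [] then []
  else
    let sorted_locs := PySem.List.sorted figure_locs pvIdx
    aOuter (aDedup sorted_locs) 0 []

-- ===== PORT B =====
-- needed by bExtend's termination: probing a member above e shrinks the part of the set above e
theorem filter_gt_length_lt (s : List Int) (e : Int) (h : (e + 1) ∈ s) :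
    (s.filter (fun x => decide (e + 1 < x))).length < (s.filter (fun x => decide (e < x))).length := by
  have hsub : List.Sublist (s.filter (fun x => decide (e + 1 < x))) (s.filter (fun x => decide (e < x))) := by
    apply List.monotone_filter_right
    intro a ha
    simp only [decide_eq_true_eq] at *
    omega
  have hle := hsub.length_le
  rcases lt_or_eq_of_le hle with hlt | heq
  · exact hlt
  · exfalso
    have := hsub.eq_of_length heq
    have h1 : (e + 1) ∈ s.filter (fun x => decide (e < x)) := by
      simp only [List.mem_filter, decide_eq_true_eq]
      exact ⟨h, by omega⟩
    rw [← this] at h1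
    simp only [List.mem_filter, decide_eq_true_eq] at h1
    omega

-- while end + 1 in present: end += 1
def bExtend (s : PySem.Set Int) (e : Int) : Int :=
  if h : PySem.Set.contains s (e + 1) then bExtend s (e + 1) else e
termination_by (s.filter (fun x => decide (e < x))).length
decreasing_by
  exact filter_gt_length_lt s e (by simpa [PySem.Set.contains] using h)

-- body of B's for-loop over one run start
def bEmitRun (start e : Int) : List String :=
  if e - start ≥ 2 then
    ["第" ++ PySem.Int.toStr (start + 1) ++ "~" ++ PySem.Int.toStr (e + 1) ++ "个图表"]
  else
    (PySem.List.pyRange start (e + 1) 1).map (fun idx => "第" ++ PySem.Int.toStr (idx + 1) ++ "个图表")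

def merge_consecutive_figures_py_alt (figure_locs : List (List (String × Int))) : List String :=
  if figure_locs = [] then []
  else
    let present := PySem.Set.ofList (figure_locs.map pvIdx)
    let starts := PySem.List.sorted
      (present.filter (fun idx => !(PySem.Set.contains present (idx - 1)))) (fun x => x)
    starts.flatMap (fun start => bEmitRun start (bExtend present start))

-- ===== PRECONDITION & SPEC =====
def Spec_merge_consecutive_figures_py (figure_locs : List (List (String × Int))) (out : List String) : Prop := out = merge_consecutive_figures_py_alt figure_locs
instance (figure_locs : List (List (String × Int))) (out : List String) : Decidable (Spec_merge_consecutive_figures_py figure_locs out) := by unfold Spec_merge_consecutive_figures_py; infer_instance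

-- ===== CLAIM (what is proved, stated in full; the proofs are below) =====
def Claim_equal_merge_consecutive_figures_py : Prop := ∀ (figure_locs : List (List (String × Int))), Dom_merge_consecutive_figures_py figure_locs → Spec_merge_consecutive_figures_py figure_locs (merge_consecutive_figures_py figure_locs)

-- ===== LEMMAS AND PROOFS =====

theorem aInner_le_len (ul : List (List (String × Int))) (s : Int) (i : Nat) :
    ∀ j, j ≤ ul.length → aInner ul s i j ≤ ul.length := by
  intro j
  induction hn : ul.length - j using Nat.strong_induction_on generalizing j with
  | _ n ih =>
    intro hj
    rw [aInner]
    split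
    · split
      · exact ih (ul.length - (j + 1)) (by omega) (j + 1) rfl (by omega)
      · exact hj
    · exact hj

-- invariant of A's dedup fold
theorem aDedup_fold_spec (l : List (List (String × Int))) :
    ∀ (s : PySem.Set Int) (u : List (List (String × Int))),
      ∃ l' : List (List (String × Int)),
        (l.foldl
          (fun (st : PySem.Set Int × List (List (String × Int))) loc =>
            let idx := pvIdx loc
            if PySem.Set.contains st.1 idx then st else (PySem.Set.add st.1 idx, st.2 ++ [loc]))
          (s, u)).2 = u ++ l' ∧
        l'.Sublist l ∧
        (l'.map pvIdx).Nodup ∧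
        (∀ a, a ∈ l'.map pvIdx ↔ a ∈ l.map pvIdx ∧ a ∉ s) := by
  induction l with
  | nil => intro s u; exact ⟨[], by simp⟩
  | cons loc l ih =>
    intro s u
    simp only [List.foldl_cons]
    by_cases hc : PySem.Set.contains s (pvIdx loc) = true
    · have hmem : pvIdx loc ∈ s := by simpa [PySem.Set.contains] using hc
      simp only [hc, if_pos]
      obtain ⟨l', h1, h2, h3, h4⟩ := ih s u
      refine ⟨l', h1, h2.cons _, h3, ?_⟩
      intro a
      rw [h4 a]
      constructor
      · rintro ⟨ha, hs⟩; exact ⟨by simp [ha], hs⟩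
      · rintro ⟨ha, hs⟩
        simp only [List.map_cons, List.mem_cons] at ha
        rcases ha with rfl | ha
        · exact absurd hmem hs
        · exact ⟨ha, hs⟩
    · have hmem : pvIdx loc ∉ s := by simpa [PySem.Set.contains] using hc
      simp only [hc, if_neg, Bool.false_eq_true, not_false_iff]
      obtain ⟨l', h1, h2, h3, h4⟩ := ih (PySem.Set.add s (pvIdx loc)) (u ++ [loc])
      refine ⟨loc :: l', by simpa using h1, h2.cons₂ _, ?_, ?_⟩
      · simp only [List.map_cons, List.nodup_cons]
        refine ⟨fun hin => ?_, h3⟩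
        have := (h4 _).mp hin
        exact this.2 (by simp [PySem.Set.mem_add])
      · intro a
        simp only [List.map_cons, List.mem_cons]
        by_cases hal : a = pvIdx loc
        · subst hal
          simp [hmem]
        · rw [h4 a]
          simp [PySem.Set.mem_add, hal]

-- A's deduplicated index sequence IS sorted(set(indices))
theorem aDedup_map (fl : List (List (String × Int))) :
    (aDedup (PySem.List.sorted fl pvIdx)).map pvIdx
      = PySem.List.sorted (PySem.Set.ofList (fl.map pvIdx)) (fun x => x) := by
  obtain ⟨l', h1, h2, h3, h4⟩ :=
    aDedup_fold_spec (PySem.List.sorted fl pvIdx) PySem.Set.empty []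
  have hX : aDedup (PySem.List.sorted fl pvIdx) = l' := by
    simpa [aDedup] using h1
  rw [hX]
  have hmem : ∀ a, a ∈ l'.map pvIdx ↔ a ∈ fl.map pvIdx := by
    intro a
    rw [h4 a]
    simp only [List.mem_map]
    constructor
    · rintro ⟨⟨x, hx, rfl⟩, -⟩
      exact ⟨x, (PySem.List.mem_sorted fl pvIdx false x).mp hx, rfl⟩
    · rintro ⟨x, hx, rfl⟩
      exact ⟨⟨x, (PySem.List.mem_sorted fl pvIdx false x).mpr hx, rfl⟩,
        by simp [PySem.Set.empty]⟩
  have hle : (l'.map pvIdx).Pairwise (· ≤ ·) :=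
    List.Pairwise.sublist (h2.map pvIdx) (PySem.List.sorted_map_key_pairwise fl pvIdx)
  have hlt : (l'.map pvIdx).Pairwise (· < ·) := by
    have := hle.and h3
    exact this.imp (fun h => lt_of_le_of_ne h.1 h.2)
  refine (PySem.List.sorted_eq_of_perm_of_pairwise_lt _ _ _ ?_ hlt).symm
  rw [List.perm_ext_iff_of_nodup (h3) (PySem.Set.nodup_ofList _)]
  intro a
  rw [hmem a, PySem.Set.mem_ofList]

-- ===== A-side characterization: A emits the run decomposition of the sorted index list =====

-- split one maximal consecutive run off the front of an int list
def bSpan (prev : Int) : List Int → List Int × List Int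
  | [] => ([], [])
  | y :: ys =>
    if y = prev + 1 then (y :: (bSpan y ys).1, (bSpan y ys).2)
    else ([], y :: ys)

theorem bSpan_snd_length (prev : Int) (l : List Int) : (bSpan prev l).2.length ≤ l.length := by
  induction l generalizing prev with
  | nil => simp [bSpan]
  | cons y ys ih =>
    simp only [bSpan]
    split
    · have := ih y
      simp only [List.length_cons]
      omega
    · simp

def bRuns : List Int → List (List Int)
  | [] => []
  | x :: xs => (x :: (bSpan x xs).1) :: bRuns (bSpan x xs).2
termination_by l => l.length
decreasing_by
  have := bSpan_snd_length x xs
  simp only [List.length_cons]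
  omega

-- emit one run (A's per-group output)
def bEmit (run : List Int) : List String :=
  if run.length ≥ 3 then
    ["第" ++ PySem.Int.toStr (PySem.List.pyGetD run 0 0 + 1) ++ "~" ++
      PySem.Int.toStr (PySem.List.pyGetD run (-1) 0 + 1) ++ "个图表"]
  else run.map (fun idx => "第" ++ PySem.Int.toStr (idx + 1) ++ "个图表")

-- the inner while scan computes exactly bSpan's split of the remaining index list
theorem inner_span (ul : List (List (String × Int))) (start : Int) (i : Nat) :
    ∀ j : Nat, bSpan (start + ((j : Int) - (i : Int)) - 1) ((ul.map pvIdx).drop j)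
      = (((ul.map pvIdx).drop j).take (aInner ul start i j - j),
         (ul.map pvIdx).drop (aInner ul start i j)) := by
  intro j
  induction hn : ul.length - j using Nat.strong_induction_on generalizing j with
  | _ n ih =>
    by_cases h : j < ul.length
    · have hjm : j < (ul.map pvIdx).length := by simpa using h
      rw [List.drop_eq_getElem_cons hjm]
      have hLj : (ul.map pvIdx)[j] = pvIdx ul[j] := by simp
      rw [aInner]
      simp only [dif_pos h]
      by_cases heq : pvIdx ul[j] = start + ((j : Int) - (i : Int))
      · simp only [if_pos heq]
        have hcond : (ul.map pvIdx)[j] = start + ((j : Int) - (i : Int)) - 1 + 1 := by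
          rw [hLj, heq]; ring
        have hrec := ih (ul.length - (j + 1)) (by omega) (j + 1) rfl
        have hprev : start + (((j + 1 : Nat) : Int) - (i : Int)) - 1
            = start + ((j : Int) - (i : Int)) := by push_cast; ring
        rw [hprev] at hrec
        have hge := le_aInner ul start i (j + 1)
        set e := aInner ul start i (j + 1) with he
        rw [bSpan]
        simp only [if_pos hcond]
        rw [hLj, heq, hrec]
        have h1 : e - j = (e - (j + 1)) + 1 := by omega
        rw [h1, List.take_succ_cons]
      · simp only [if_neg heq]
        rw [bSpan]
        have hcond : ¬ ((ul.map pvIdx)[j] = start + ((j : Int) - (i : Int)) - 1 + 1) := by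
          rw [hLj]
          intro hx
          exact heq (by linarith)
        simp only [if_neg hcond, Nat.sub_self, List.take_zero]
        rw [← List.drop_eq_getElem_cons hjm]
    · have hge : (ul.map pvIdx).length ≤ j := by simpa using Nat.le_of_not_lt h
      rw [List.drop_eq_nil_of_le hge]
      rw [aInner]
      simp only [dif_neg h, Nat.sub_self, List.take_zero]
      rw [List.drop_eq_nil_of_le hge]
      rfl

-- index loop over range(i, e) = map over the corresponding slice of the index list
theorem range_map_slice (g : Int → String) (ul : List (List (String × Int))) :
    ∀ (n i : Nat), i + n ≤ ul.length →
      (PySem.List.pyRange (i : Int) ((i + n : Nat) : Int) 1).map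
          (fun k => g (pvIdx (PySem.List.pyGetD ul k [])))
        = (((ul.map pvIdx).drop i).take n).map g := by
  intro n
  induction n with
  | zero =>
    intro i _
    rw [PySem.List.pyRange_one_eq_nil (by push_cast; omega)]
    simp
  | succ n ih =>
    intro i hle
    have hi : i < ul.length := by omega
    have him : i < (ul.map pvIdx).length := by simpa using hi
    rw [PySem.List.pyRange_one_cons (by push_cast; omega)]
    have hnext : ((i : Int) + 1) = (((i + 1 : Nat)) : Int) := by push_cast; ring
    have hend : (((i + (n + 1) : Nat)) : Int) = (((i + 1) + n : Nat) : Int) := by push_cast; ring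
    rw [List.map_cons]
    rw [List.drop_eq_getElem_cons him, List.take_succ_cons, List.map_cons]
    congr 1
    · have : PySem.List.pyGetD ul ((i : Nat) : Int) [] = ul[i] := by
        rw [PySem.List.pyGetD_natCast]
        exact List.getD_eq_getElem ul [] hi
      rw [this]
      simp
    · rw [hend, hnext, ih (i + 1) (by omega)]

-- the outer while loop emits exactly the run decomposition of the remaining indices
theorem outer_eq (ul : List (List (String × Int))) :
    ∀ i merged, aOuter ul i merged
      = merged ++ (bRuns ((ul.map pvIdx).drop i)).flatMap bEmit := by
  intro i
  induction hn : ul.length - i using Nat.strong_induction_on generalizing i with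
  | _ n ih =>
    intro merged
    by_cases h : i < ul.length
    · have him : i < (ul.map pvIdx).length := by simpa using h
      have hstart : (ul.map pvIdx)[i] = pvIdx ul[i] := by simp
      set start := pvIdx ul[i] with hs
      set e := aInner ul start i (i + 1) with he
      have hge : i + 1 ≤ e := le_aInner ul start i (i + 1)
      have hlen : e ≤ ul.length := aInner_le_len ul start i (i + 1) (by omega)
      have hspan := inner_span ul start i (i + 1)
      have hprev : start + (((i + 1 : Nat) : Int) - (i : Int)) - 1 = start := by push_cast; ring
      rw [hprev, ← he] at hspan
      have hrun : bRuns ((ul.map pvIdx).drop i)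
          = ((ul.map pvIdx)[i] :: (((ul.map pvIdx).drop (i + 1)).take (e - (i + 1))))
            :: bRuns ((ul.map pvIdx).drop e) := by
        rw [List.drop_eq_getElem_cons him, bRuns]
        rw [hstart, hspan]
      have hrunlen :
          ((ul.map pvIdx)[i] :: (((ul.map pvIdx).drop (i + 1)).take (e - (i + 1)))).length
            = e - i := by
        simp only [List.length_cons, List.length_take, List.length_drop, List.length_map]
        omega
      rw [aOuter]
      simp only [dif_pos h, ← hs, ← he]
      rw [ih (ul.length - e) (by omega) e rfl, hrun]
      rw [List.flatMap_cons, ← List.append_assoc]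
      congr 1
      rw [bEmit, hrunlen, hstart]
      have hrs : (start :: List.take (e - (i + 1)) (List.drop (i + 1) (List.map pvIdx ul)))
          = ((ul.map pvIdx).drop i).take (e - i) := by
        rw [List.drop_eq_getElem_cons him]
        have h4 : e - i = (e - (i + 1)) + 1 := by omega
        rw [h4, List.take_succ_cons, hstart]
      by_cases h3 : e - i ≥ 3
      · simp only [if_pos h3]
        have hlen' : (start :: List.take (e - (i + 1)) (List.drop (i + 1) (List.map pvIdx ul))).length
            = e - i := by
          simp only [List.length_cons, List.length_take, List.length_drop, List.length_map]
          omega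
        have hlast : PySem.List.pyGetD
            (start :: List.take (e - (i + 1)) (List.drop (i + 1) (List.map pvIdx ul))) (-1) 0
            = pvIdx (ul[e - 1]'(by omega)) := by
          rw [PySem.List.pyGetD_neg_one _ 0 (by simp), List.getLast_eq_getElem]
          simp only [hlen']
          rw [List.getElem_of_eq hrs, List.getElem_take, List.getElem_drop]
          have h5 : i + (e - i - 1) = e - 1 := by omega
          simp only [h5]
          simp
        have hgd : PySem.List.pyGetD ul ((e : Int) - 1) [] = ul[e - 1]'(by omega) := by
          have hei : ((e : Int) - 1) = (((e - 1 : Nat)) : Int) := by omega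
          rw [hei, PySem.List.pyGetD_natCast]
          exact List.getD_eq_getElem ul [] (by omega)
        rw [hlast, hgd, PySem.List.pyGetD_zero_cons]
      · simp only [if_neg h3]
        have hcast : ((e : Nat) : Int) = (((i + (e - i) : Nat)) : Int) := by omega
        rw [hcast,
          range_map_slice (fun idx => "第" ++ PySem.Int.toStr (idx + 1) ++ "个图表") ul
            (e - i) i (by omega), hrs]
    · rw [aOuter]
      simp only [dif_neg h]
      have hge : (ul.map pvIdx).length ≤ i := by simpa using Nat.le_of_not_lt h
      rw [List.drop_eq_nil_of_le hge]
      simp [bRuns]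

-- ===== B-side: the run decomposition equals B's membership-probing loop =====

-- structure of one run split off a strictly increasing list
theorem bSpan_append (p : Int) (l : List Int) : (bSpan p l).1 ++ (bSpan p l).2 = l := by
  induction l generalizing p with
  | nil => simp [bSpan]
  | cons y ys ih =>
    simp only [bSpan]
    split
    · simpa using ih y
    · simp

theorem run_struct (x : Int) (xs : List Int) (hpw : (x :: xs).Pairwise (· < ·)) :
    x :: (bSpan x xs).1
        = PySem.List.pyRange x (x + ((bSpan x xs).1.length : Int) + 1) 1 ∧
      (∀ y ∈ (bSpan x xs).2, x + ((bSpan x xs).1.length : Int) + 2 ≤ y) := by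
  induction xs generalizing x with
  | nil =>
    simp [bSpan, PySem.List.pyRange_one_singleton]
  | cons y ys ih =>
    rw [List.pairwise_cons] at hpw
    obtain ⟨hxall, hpw'⟩ := hpw
    by_cases hy : y = x + 1
    · subst hy
      obtain ⟨h1, h2⟩ := ih (x + 1) hpw'
      rw [show bSpan x ((x + 1) :: ys) = ((x + 1) :: (bSpan (x + 1) ys).1, (bSpan (x + 1) ys).2)
        from by rw [bSpan, if_pos rfl]]
      simp only [List.length_cons]
      constructor
      · rw [show (x + (((bSpan (x + 1) ys).1.length + 1 : Nat) : Int) + 1)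
            = ((x + 1) + ((bSpan (x + 1) ys).1.length : Int) + 1) by push_cast; ring,
          PySem.List.pyRange_one_cons (by omega)]
        rw [← h1]
      · intro z hz
        have := h2 z hz
        push_cast at this ⊢
        omega
    · simp only [bSpan, if_neg hy, List.length_nil]
      refine ⟨?_, ?_⟩
      · rw [Nat.cast_zero, add_zero, PySem.List.pyRange_one_singleton]
      · intro z hz
        simp only [List.mem_cons] at hz
        have hxy : x < y := hxall y (by simp)
        rcases hz with rfl | hz
        · push_cast; omega
        · have hyz : y < z := (List.pairwise_cons.mp hpw').1 z hz
          push_cast; omega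

-- while-extension from a run start reaches exactly the run's last element
theorem bExtend_eq (s : PySem.Set Int) (x : Int) (m : Nat)
    (hin : ∀ i : Nat, i ≤ m → (x + (i : Int)) ∈ s) (hout : (x + (m : Int) + 1) ∉ s) :
    bExtend s x = x + (m : Int) := by
  induction m generalizing x with
  | zero =>
    have hnc : ¬ PySem.Set.contains s (x + 1) = true := fun hc => by
      have hm : (x + 1) ∈ s := by simpa [PySem.Set.contains] using hc
      exact hout (by simpa using hm)
    rw [bExtend, dif_neg hnc]
    simp
  | succ m ih =>
    have h1 : PySem.Set.contains s (x + 1) = true := by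
      have := hin 1 (by omega)
      simpa [PySem.Set.contains] using this
    have hin' : ∀ i : Nat, i ≤ m → ((x + 1) + (i : Int)) ∈ s := by
      intro i hi
      have h := hin (i + 1) (by omega)
      rwa [show (x : Int) + ((i + 1 : Nat) : Int) = (x + 1) + (i : Int) by push_cast; ring] at h
    have hout' : ((x + 1) + (m : Int) + 1) ∉ s := by
      rwa [show (x : Int) + ((m + 1 : Nat) : Int) + 1 = (x + 1) + (m : Int) + 1 by push_cast; ring]
        at hout
    rw [bExtend, dif_pos h1, ih (x + 1) hin' hout']
    push_cast
    ring

theorem main_runs (s : PySem.Set Int) :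
    ∀ L : List Int, L.Pairwise (· < ·) → (∀ z ∈ L, z ∈ s) →
      (∀ z ∈ s, z ∈ L ∨ ∀ w ∈ L, z + 1 < w) →
      (bRuns L).flatMap bEmit
        = (L.filter (fun idx => !(PySem.Set.contains s (idx - 1)))).flatMap
            (fun start => bEmitRun start (bExtend s start)) := by
  intro L
  induction hn : L.length using Nat.strong_induction_on generalizing L with
  | _ n ih =>
    cases L with
    | nil => intro _ _ _; simp [bRuns]
    | cons x xs =>
      intro hpw hup hlow
      obtain ⟨hrun, hsndge⟩ := run_struct x xs hpw
      set fst := (bSpan x xs).1 with hfst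
      set snd := (bSpan x xs).2 with hsnd2
      set m := fst.length with hm
      have happ : fst ++ snd = xs := bSpan_append x xs
      have hrunmem : ∀ z, z ∈ x :: fst ↔ x ≤ z ∧ z < x + (m : Int) + 1 := by
        intro z
        rw [hrun]
        exact PySem.List.mem_pyRange_one
      have hfst_eq : fst = PySem.List.pyRange (x + 1) (x + (m : Int) + 1) 1 := by
        have h := hrun
        rw [PySem.List.pyRange_one_cons (by omega)] at h
        injection h
      have hfstmem : ∀ z, z ∈ fst ↔ x + 1 ≤ z ∧ z < x + (m : Int) + 1 := by
        intro z
        rw [hfst_eq]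
        exact PySem.List.mem_pyRange_one
      have hLmem : ∀ z, z ∈ x :: xs ↔ z ∈ x :: fst ∨ z ∈ snd := by
        intro z
        rw [← happ]
        simp [List.mem_cons, List.mem_append, or_assoc]
      have hAllGe : ∀ w ∈ x :: xs, x ≤ w := by
        intro w hw
        rcases List.mem_cons.mp hw with rfl | hw
        · exact le_refl w
        · exact le_of_lt ((List.pairwise_cons.mp hpw).1 w hw)
      have hx1 : (x - 1) ∉ s := by
        intro hmem
        rcases hlow _ hmem with hin | hfar
        · have := hAllGe _ hin; omega
        · have := hfar x (by simp); omega
      have hins : ∀ i : Nat, i ≤ m → (x + (i : Int)) ∈ s := by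
        intro i hi
        apply hup
        rw [hLmem]
        left
        rw [hrunmem]
        constructor <;> omega
      have hout : (x + (m : Int) + 1) ∉ s := by
        intro hmem
        rcases hlow _ hmem with hin | hfar
        · rw [hLmem] at hin
          rcases hin with hin | hin
          · rw [hrunmem] at hin; omega
          · have := hsndge _ hin; omega
        · have := hfar x (by simp); omega
      have hext : bExtend s x = x + (m : Int) := bExtend_eq s x m hins hout
      -- the filter keeps x (a run start) and drops the rest of the run
      have hpredx : (!(PySem.Set.contains s (x - 1))) = true := by
        have hc : PySem.Set.contains s (x - 1) = false := by
          rw [Bool.eq_false_iff]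
          intro hc
          exact hx1 (by simpa [PySem.Set.contains] using hc)
        rw [hc]
        rfl
      have hfilterfst : fst.filter (fun idx => !(PySem.Set.contains s (idx - 1))) = [] := by
        rw [List.filter_eq_nil_iff]
        intro z hz
        have hzr := (hfstmem z).mp hz
        have hzin : (z - 1) ∈ s := by
          apply hup
          rw [hLmem]
          left
          rw [hrunmem]
          omega
        have hc : PySem.Set.contains s (z - 1) = true := by
          simpa [PySem.Set.contains] using hzin
        simp only [Bool.not_eq_true']
        rw [hc]
        simp
      have hfL : (x :: xs).filter (fun idx => !(PySem.Set.contains s (idx - 1)))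
          = x :: snd.filter (fun idx => !(PySem.Set.contains s (idx - 1))) := by
        rw [← happ]
        simp only [List.filter_cons, hpredx, if_true, List.filter_append, hfilterfst,
          List.nil_append]
      -- recursion on the remainder
      have hsndpw : snd.Pairwise (· < ·) := by
        refine List.Pairwise.sublist ?_ hpw
        rw [← happ]
        exact (List.sublist_append_right fst snd).trans (List.sublist_cons_self x _)
      have hsndup : ∀ z ∈ snd, z ∈ s := by
        intro z hz
        exact hup z ((hLmem z).mpr (Or.inr hz))
      have hsndlow : ∀ z ∈ s, z ∈ snd ∨ ∀ w ∈ snd, z + 1 < w := by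
        intro z hz
        rcases hlow z hz with hin | hfar
        · rw [hLmem] at hin
          rcases hin with hin | hin
          · right
            intro w hw
            have h1 := (hrunmem z).mp hin
            have h2 := hsndge w hw
            omega
          · exact Or.inl hin
        · right
          intro w hw
          exact hfar w ((hLmem w).mpr (Or.inr hw))
      have hsndlen : snd.length < n := by
        have h1 : fst.length + snd.length = xs.length := by
          rw [← happ]; simp
        simp only [List.length_cons] at hn
        omega
      rw [show bRuns (x :: xs) = (x :: fst) :: bRuns snd from by rw [bRuns]]
      rw [List.flatMap_cons, ih snd.length hsndlen snd rfl hsndpw hsndup hsndlow, hfL,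
        List.flatMap_cons]
      congr 1
      -- the head run's output
      rw [hext, bEmit, bEmitRun]
      have hlen : (x :: fst).length = m + 1 := by simp [hm]
      by_cases h3 : 2 ≤ m
      · rw [if_pos (by rw [hlen]; omega), if_pos (by omega)]
        have h0 : PySem.List.pyGetD (x :: fst) 0 0 = x := PySem.List.pyGetD_zero_cons x fst 0
        have hlast : PySem.List.pyGetD (x :: fst) (-1) 0 = x + (m : Int) := by
          rw [hrun, show x + (m : Int) + 1 = (x + (m : Int)) + 1 from rfl,
            PySem.List.pyRange_one_succ_right (by omega)]
          exact PySem.List.pyGetD_neg_one_append_singleton _ _ _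
        rw [h0, hlast]
      · rw [if_neg (by rw [hlen]; omega), if_neg (by omega)]
        rw [← hrun]

-- ===== VERDICT (by name: the statement is the Claim_ definition above) =====
theorem merge_consecutive_figures_py_spec : Claim_equal_merge_consecutive_figures_py := by
  intro fl _
  unfold Spec_merge_consecutive_figures_py
  unfold merge_consecutive_figures_py merge_consecutive_figures_py_alt
  by_cases hfl : fl = []
  · simp [hfl]
  · simp only [if_neg hfl]
    rw [outer_eq]
    simp only [List.drop_zero, List.nil_append]
    rw [aDedup_map]
    set s := PySem.Set.ofList (fl.map pvIdx) with hsdef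
    set L := PySem.List.sorted s (fun x => x) with hL
    have hpw : L.Pairwise (· < ·) := PySem.List.sorted_ofList_pairwise_lt (fl.map pvIdx)
    have hmemL : ∀ z, z ∈ L ↔ z ∈ s := fun z => PySem.List.mem_sorted s (fun x => x) false z
    rw [main_runs s L hpw (fun z hz => (hmemL z).mp hz)
      (fun z hz => Or.inl ((hmemL z).mpr hz))]
    congr 1
    refine (PySem.List.sorted_eq_of_perm_of_pairwise_lt _ _ _ ?_ ?_).symm
    · exact (List.Perm.filter _ ((PySem.List.sorted_perm s (fun x => x) false)))
    · exact hpw.filter _
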